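-- pv_equiv track=rewrite | github.com/Turbo0005/ETH_DEX_Analyzer | eth_wallet_tracker.py | find_active_wallets
-- ===== SOURCE A (Python) =====
-- def find_active_wallets(range_transactions, min_ranges=2):
--     """找出在多个时间段内都有交易的钱包"""
--     wallet_activity = {}
--
--     # 统计每个钱包在不同时间段的活动
--     for range_idx, transactions in range_transactions.items():
--         for tx in transactions:
--             wallet = tx['wallet']
--             if wallet not in wallet_activity:
--                 wallet_activity[wallet] = set()
--             wallet_activity[wallet].add(range_idx)
--
--     # 筛选出在足够多时间段内活跃的钱包
--     active_wallets = {
--         wallet: ranges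
--         for wallet, ranges in wallet_activity.items()
--         if len(ranges) >= min_ranges
--     }
--
--     return active_wallets
-- ===== SOURCE B (Python) =====
-- def find_active_wallets(range_transactions, min_ranges=2):
--     """Alternative: collect wallets in first-appearance order, then recompute
--     each wallet's active ranges by a direct scan over the ranges."""
--     wallets = []
--     for transactions in range_transactions.values():
--         for tx in transactions:
--             w = tx['wallet']
--             if w not in wallets:
--                 wallets.append(w)
--     result = {}
--     for w in wallets:
--         ranges = [idx for idx, transactions in range_transactions.items()
--                   if any(tx['wallet'] == w for tx in transactions)]
--         if len(ranges) >= min_ranges: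
--             result[w] = set(ranges)
--     return result
-- ===== Notes on version B (the rewrite author's own statement) =====
-- stated objective: alternative
-- what changed: A builds a dict of wallet->set-of-ranges in one hash-accumulation pass; B first collects the wallets in first-appearance order and then recomputes each wallet's active ranges by a direct per-wallet re-scan of the ranges, with no accumulating dict of sets.
import Mathlib
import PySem

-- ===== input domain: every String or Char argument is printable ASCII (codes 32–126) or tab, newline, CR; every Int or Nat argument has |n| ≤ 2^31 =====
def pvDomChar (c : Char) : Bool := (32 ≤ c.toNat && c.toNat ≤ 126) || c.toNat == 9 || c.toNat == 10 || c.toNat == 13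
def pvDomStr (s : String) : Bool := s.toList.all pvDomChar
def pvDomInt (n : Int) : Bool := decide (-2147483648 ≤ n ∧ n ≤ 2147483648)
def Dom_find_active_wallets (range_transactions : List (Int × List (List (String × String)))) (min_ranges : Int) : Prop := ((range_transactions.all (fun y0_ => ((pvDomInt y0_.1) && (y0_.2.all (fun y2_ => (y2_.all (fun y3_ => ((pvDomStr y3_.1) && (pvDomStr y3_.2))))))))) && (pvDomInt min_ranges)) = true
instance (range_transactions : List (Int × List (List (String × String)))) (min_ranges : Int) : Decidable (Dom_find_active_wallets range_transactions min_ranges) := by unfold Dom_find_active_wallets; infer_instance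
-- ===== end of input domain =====

-- B replaces A's single hash-accumulation pass (dict of range-sets) by a two-phase scan: collect the wallets in
-- first-appearance order, then recompute each wallet's active ranges by a direct re-scan (objective: alternative).

-- ===== PORT A =====
-- tx['wallet']: the tx dict's value at key "wallet". Pre_ guarantees the key exists, so the `.getD ""` default is
-- never the value used on admitted inputs (Python raises KeyError exactly where get? is none).
def pvWallet (tx : List (String × String)) : String :=
  ((PySem.Dict.ofList tx).get? "wallet").getD ""

def find_active_wallets (range_transactions : List (Int × List (List (String × String)))) (min_ranges : Int) : List (String × List Int) :=
  -- for range_idx, transactions in range_transactions.items(): for tx in transactions: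
  let wallet_activity : PySem.Dict String (PySem.Set Int) :=
    (PySem.Dict.ofList range_transactions).items.foldl (fun d p =>
      p.2.foldl (fun d tx =>
        let wallet := pvWallet tx
        -- if wallet not in wallet_activity: wallet_activity[wallet] = set()
        let d := if d.contains wallet then d else d.insert wallet PySem.Set.empty
        -- wallet_activity[wallet].add(range_idx)   (the key is present here, so modify's default is never used)
        d.modify wallet PySem.Set.empty (fun s => PySem.Set.add s p.1)) d)
      PySem.Dict.empty
  -- {wallet: ranges for wallet, ranges in wallet_activity.items() if len(ranges) >= min_ranges}
  (wallet_activity.items.foldl (fun r q =>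
      if min_ranges ≤ PySem.Set.len q.2 then r.insert q.1 q.2 else r)
    PySem.Dict.empty).items

-- ===== PORT B =====
def find_active_wallets_alt (range_transactions : List (Int × List (List (String × String)))) (min_ranges : Int) : List (String × List Int) :=
  let items := (PySem.Dict.ofList range_transactions).items
  -- wallets: first-appearance order over all transactions
  let wallets : List String :=
    items.foldl (fun ws p =>
      p.2.foldl (fun ws tx =>
        if pvWallet tx ∈ ws then ws else ws ++ [pvWallet tx]) ws) []
  -- per wallet, recompute the ranges it appears in by a direct scan; keep it if there are enough
  (wallets.foldl (fun r w =>
      let ranges : List Int :=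
        (items.filter (fun p => p.2.any (fun tx => pvWallet tx == w))).map (·.1)
      if min_ranges ≤ (ranges.length : Int) then r.insert w (PySem.Set.ofList ranges) else r)
    PySem.Dict.empty).items

-- ===== PRECONDITION & SPEC =====
-- Pre_: every transaction dict carries a 'wallet' key; elsewhere Python A raises KeyError (and so does B).
def Pre_find_active_wallets (range_transactions : List (Int × List (List (String × String)))) (min_ranges : Int) : Prop :=
  ∀ p ∈ (PySem.Dict.ofList range_transactions).items, ∀ tx ∈ p.2, tx.any (fun kv => kv.1 == "wallet") = true
instance (range_transactions : List (Int × List (List (String × String)))) (min_ranges : Int) : Decidable (Pre_find_active_wallets range_transactions min_ranges) := by unfold Pre_find_active_wallets; infer_instance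
def pvWitness_find_active_wallets : (List (Int × List (List (String × String)))) × Int :=
  ([(0, [[("wallet", "a")], [("wallet", "b")]]), (1, [[("wallet", "a")]])], 2)

def Spec_find_active_wallets (range_transactions : List (Int × List (List (String × String)))) (min_ranges : Int) (out : List (String × List Int)) : Prop := out = find_active_wallets_alt range_transactions min_ranges
instance (range_transactions : List (Int × List (List (String × String)))) (min_ranges : Int) (out : List (String × List Int)) : Decidable (Spec_find_active_wallets range_transactions min_ranges out) := by unfold Spec_find_active_wallets; infer_instance

-- ===== CLAIM (what is proved, stated in full; the proofs are below) =====
def Claim_equal_find_active_wallets : Prop := ∀ (range_transactions : List (Int × List (List (String × String)))) (min_ranges : Int), Dom_find_active_wallets range_transactions min_ranges → Pre_find_active_wallets range_transactions min_ranges → Spec_find_active_wallets range_transactions min_ranges (find_active_wallets range_transactions min_ranges)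

-- ===== LEMMAS AND PROOFS =====

-- A's accumulation step, acting on one flattened (wallet, range_idx) pair
def pvStep (d : PySem.Dict String (PySem.Set Int)) (q : String × Int) : PySem.Dict String (PySem.Set Int) :=
  let d' := if d.contains q.1 then d else d.insert q.1 PySem.Set.empty
  d'.modify q.1 PySem.Set.empty (fun s => PySem.Set.add s q.2)

-- the flattened (wallet, range_idx) pairs, in traversal order
def pvFlat (l : List (Int × List (List (String × String)))) : List (String × Int) :=
  l.flatMap (fun p => p.2.map (fun tx => (pvWallet tx, p.1)))

-- the range indices paired with wallet w, in order
def pvProj (pl : List (String × Int)) (w : String) : List Int :=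
  (pl.filter (fun q => q.1 == w)).map (·.2)

lemma pvOfList_snoc {α : Type} [BEq α] (xs : List α) (x : α) :
    PySem.Set.ofList (xs ++ [x]) = PySem.Set.add (PySem.Set.ofList xs) x := by
  simp [PySem.Set.ofList_eq_foldl, List.foldl_append]

lemma pvGet?_map_form (ws : List String) (v : String → PySem.Set Int) (hn : ws.Nodup) (w : String) :
    (PySem.Dict.mk (ws.map (fun w' => (w', v w')))).get? w = if w ∈ ws then some (v w) else none := by
  induction ws with
  | nil => simp [PySem.Dict.get?]
  | cons a ws ih =>
    simp only [List.map_cons]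
    rw [PySem.Dict.get?_mk_cons]  -- hope it exists in this form
    rcases List.nodup_cons.mp hn with ⟨ha, hn'⟩
    by_cases h : a = w
    · subst h; simp
    · simp only [beq_iff_eq, h, if_false]
      rw [ih hn']
      simp [List.mem_cons, Ne.symm h]

lemma pvFoldl_add_mem (s : PySem.Set Int) (ys : List Int) (h : ∀ y ∈ ys, y ∈ s) :
    ys.foldl PySem.Set.add s = s := by
  induction ys with
  | nil => rfl
  | cons y ys ih =>
    simp only [List.foldl_cons]
    rw [PySem.Set.add_of_mem (h y (by simp))]
    exact ih (fun y hy => h y (by simp [hy]))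

lemma pvFoldl_add_const (s : PySem.Set Int) (ys : List Int) (i : Int)
    (h : ∀ y ∈ ys, y = i) (hi : i ∉ s) :
    ys.foldl PySem.Set.add s = if ys.isEmpty then s else s ++ [i] := by
  cases ys with
  | nil => rfl
  | cons y ys =>
    rw [List.foldl_cons, if_neg (by simp)]
    have hy : y = i := h y (by simp)
    subst hy
    rw [PySem.Set.add_of_not_mem hi]
    exact pvFoldl_add_mem _ _ (fun z hz => by simp [h z (by simp [hz])])

lemma pvFold_step_items (pl : List (String × Int)) :
    (pl.foldl pvStep PySem.Dict.empty).items
      = (PySem.Set.ofList (pl.map (·.1))).map (fun w => (w, PySem.Set.ofList (pvProj pl w))) := by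
  induction pl using List.reverseRecOn with
  | nil => rfl
  | append_singleton pl q ih =>
    obtain ⟨w, i⟩ := q
    rw [List.foldl_append, List.foldl_cons, List.foldl_nil]
    set d := pl.foldl pvStep PySem.Dict.empty with hd_def
    set S := PySem.Set.ofList (pl.map (·.1)) with hS_def
    have hS : S.Nodup := PySem.Set.nodup_ofList _
    have hd : d = PySem.Dict.mk (S.map fun w' => (w', PySem.Set.ofList (pvProj pl w'))) :=
      PySem.Dict.ext ih
    have hcont : d.contains w = true ↔ w ∈ S := by
      rw [hd]; simp [PySem.Dict.contains, List.any_map, List.any_eq_true]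
    have hproj : ∀ w', pvProj (pl ++ [(w, i)]) w'
        = pvProj pl w' ++ (if w' = w then [i] else []) := by
      intro w'
      simp only [pvProj, List.filter_append, List.map_append]
      congr 1
      by_cases h : w' = w
      · subst h; simp [List.filter, beq_iff_eq]
      · have hb : (w == w') = false := by simp [Ne.symm h]
        simp [List.filter, hb, h]
    have hkeys : (pl ++ [(w, i)]).map (·.1) = pl.map (·.1) ++ [w] := by simp
    by_cases hw : w ∈ S
    · -- wallet already present
      rw [hkeys, pvOfList_snoc, PySem.Set.add_of_mem hw]
      show (pvStep d (w, i)).items = _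
      rw [pvStep]
      simp only [hcont.mpr hw, if_true]
      have hget : d.get? w = some (PySem.Set.ofList (pvProj pl w)) := by
        rw [hd, pvGet?_map_form S _ hS w]; simp [hw]
      have hgetD : d.getD w PySem.Set.empty = PySem.Set.ofList (pvProj pl w) :=
        PySem.Dict.getD_of_get?_eq_some d PySem.Set.empty hget
      show (d.insert w (PySem.Set.add (d.getD w PySem.Set.empty) i)).items = _
      rw [hgetD, PySem.Dict.items_insert_of_contains d _ (hcont.mpr hw), ih, List.map_map]
      apply List.map_congr_left
      intro w' hw'
      by_cases h : w' = w
      · subst h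
        simp [hproj, pvOfList_snoc]
      · have hb : (w' == w) = false := by simp [h]
        simp [hb, hproj, h]
    · -- new wallet
      have hcf : d.contains w = false := Bool.eq_false_iff.mpr (fun hh => hw (hcont.mp hh))
      rw [hkeys, pvOfList_snoc, PySem.Set.add_of_not_mem hw]
      show (pvStep d (w, i)).items = _
      rw [pvStep]
      simp only [hcf, Bool.false_eq_true, if_false]
      have hwpl : w ∉ pl.map (·.1) := fun hh => hw (by simpa [hS_def, PySem.Set.mem_ofList] using hh)
      have hproj0 : pvProj pl w = [] := by
        have : pl.filter (fun q => q.1 == w) = [] := by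
          rw [List.filter_eq_nil_iff]
          intro q hq
          simp only [beq_iff_eq]
          exact fun hh => hwpl (by simpa [hh] using List.mem_map_of_mem (f := (·.1)) hq)
        simp [pvProj, this]
      have hn' : (S ++ [w]).Nodup := by
        rw [List.nodup_append]
        exact ⟨hS, List.nodup_singleton w, by intro a ha b hb; rw [List.mem_singleton] at hb; subst hb; exact fun hh => hw (hh ▸ ha)⟩
      have hd' : d.insert w PySem.Set.empty
          = PySem.Dict.mk ((S ++ [w]).map (fun w' => (w', if w' = w then PySem.Set.empty else PySem.Set.ofList (pvProj pl w')))) := by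
        apply PySem.Dict.ext
        rw [PySem.Dict.items_insert_of_not_contains d _ hcf, ih, List.map_append]
        congr 1
        · apply List.map_congr_left
          intro w' hw'
          have h : ¬ w' = w := fun hh => hw (hh ▸ hw')
          simp [h]
        · simp
      have hget' : (d.insert w PySem.Set.empty).get? w = some PySem.Set.empty := by
        rw [hd', pvGet?_map_form (S ++ [w]) _ hn' w]
        simp
      have hcont' : (d.insert w PySem.Set.empty).contains w = true := by
        rw [hd']
        simp [PySem.Dict.contains, List.any_map, List.any_eq_true]
      show ((d.insert w PySem.Set.empty).insert w
        (PySem.Set.add ((d.insert w PySem.Set.empty).getD w PySem.Set.empty) i)).items = _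
      rw [PySem.Dict.getD_of_get?_eq_some (d.insert w PySem.Set.empty) PySem.Set.empty hget',
          PySem.Dict.items_insert_of_contains _ _ hcont', hd']
      show ((S ++ [w]).map _).map _ = _
      rw [List.map_map]
      apply List.map_congr_left
      intro w' hw'
      by_cases h : w' = w
      · subst h
        simp only [Function.comp, beq_self_eq_true, if_true, if_pos rfl]
        refine congrArg _ ?_
        rw [hproj, hproj0, if_pos rfl]
        simp [PySem.Set.ofList_eq_foldl]
      · have hb : (w' == w) = false := by simp [h]
        simp [Function.comp, hb, h, hproj]

lemma pvProj_eq_ranges (l : List (Int × List (List (String × String)))) (hn : (l.map (·.1)).Nodup) (w : String) :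
    PySem.Set.ofList (pvProj (pvFlat l) w)
      = (l.filter (fun p => p.2.any (fun tx => pvWallet tx == w))).map (·.1) := by
  induction l using List.reverseRecOn with
  | nil => rfl
  | append_singleton l p ih =>
    rw [List.map_append] at hn
    rw [List.nodup_append] at hn
    obtain ⟨hnl, -, hdisj⟩ := hn
    have hp1 : p.1 ∉ l.map (·.1) := by
      intro hh
      exact hdisj p.1 hh p.1 (by simp) rfl
    have hflat : pvFlat (l ++ [p]) = pvFlat l ++ p.2.map (fun tx => (pvWallet tx, p.1)) := by
      simp [pvFlat]
    have hproj : pvProj (pvFlat (l ++ [p])) w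
        = pvProj (pvFlat l) w ++ pvProj (p.2.map (fun tx => (pvWallet tx, p.1))) w := by
      rw [hflat]; simp [pvProj, List.filter_append]
    have hys : ∀ y ∈ pvProj (p.2.map (fun tx => (pvWallet tx, p.1))) w, y = p.1 := by
      intro y hy
      simp only [pvProj, List.mem_map, List.mem_filter, List.mem_map] at hy
      obtain ⟨q, ⟨⟨tx, htx, rfl⟩, -⟩, rfl⟩ := hy
      rfl
    have hnotmem : p.1 ∉ PySem.Set.ofList (pvProj (pvFlat l) w) := by
      rw [ih hnl]
      intro hh
      rcases List.mem_map.mp hh with ⟨q, hq, hq1⟩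
      exact hp1 (hq1 ▸ List.mem_map_of_mem (f := (·.1)) (List.mem_of_mem_filter hq))
    have hofl : PySem.Set.ofList (pvProj (pvFlat (l ++ [p])) w)
        = if (pvProj (p.2.map (fun tx => (pvWallet tx, p.1))) w).isEmpty
          then PySem.Set.ofList (pvProj (pvFlat l) w)
          else PySem.Set.ofList (pvProj (pvFlat l) w) ++ [p.1] := by
      rw [hproj, PySem.Set.ofList_eq_foldl, List.foldl_append, ← PySem.Set.ofList_eq_foldl]
      exact pvFoldl_add_const _ _ _ hys hnotmem
    have hempty : (pvProj (p.2.map (fun tx => (pvWallet tx, p.1))) w).isEmpty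
        = !(p.2.any (fun tx => pvWallet tx == w)) := by
      rcases hany : p.2.any (fun tx => pvWallet tx == w) with _ | _
      · simp only [List.any_eq_false] at hany
        rw [Bool.not_false, List.isEmpty_iff]
        simp only [pvProj, List.map_eq_nil_iff, List.filter_eq_nil_iff]
        intro q hq
        rcases List.mem_map.mp hq with ⟨tx, htx, rfl⟩
        simpa using hany tx htx
      · obtain ⟨tx, htx, htxw⟩ := List.any_eq_true.mp hany
        rw [Bool.not_true]
        apply Bool.eq_false_iff.mpr
        intro hh
        rw [List.isEmpty_iff] at hh
        simp only [pvProj, List.map_eq_nil_iff, List.filter_eq_nil_iff] at hh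
        exact absurd htxw (by simpa using hh _ (List.mem_map_of_mem (f := fun tx => (pvWallet tx, p.1)) htx))
    rw [hofl, hempty, List.filter_append, List.map_append, ih hnl]
    rcases hany : p.2.any (fun tx => pvWallet tx == w) with _ | _
    · simp [List.filter, hany]
    · simp [List.filter, hany]

lemma pvA_wa (l : List (Int × List (List (String × String)))) (init : PySem.Dict String (PySem.Set Int)) :
    l.foldl (fun d p =>
      p.2.foldl (fun d tx =>
        let wallet := pvWallet tx
        let d := if d.contains wallet then d else d.insert wallet PySem.Set.empty
        d.modify wallet PySem.Set.empty (fun s => PySem.Set.add s p.1)) d) init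
    = (pvFlat l).foldl pvStep init := by
  rw [pvFlat, List.foldl_flatMap]
  apply PySem.List.foldl_congr_mem
  intro d p _
  rw [List.foldl_map]
  rfl

lemma pvB_wallets (l : List (Int × List (List (String × String)))) (init : List String) :
    l.foldl (fun ws p =>
      p.2.foldl (fun ws tx =>
        if pvWallet tx ∈ ws then ws else ws ++ [pvWallet tx]) ws) init
    = List.foldl PySem.Set.add init ((pvFlat l).map (·.1)) := by
  rw [List.foldl_map, pvFlat, List.foldl_flatMap]
  apply PySem.List.foldl_congr_mem
  intro ws p _
  rw [List.foldl_map]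
  apply PySem.List.foldl_congr_mem
  intro ws' tx _
  rw [PySem.Set.add_eq_ite]
-- ===== VERDICT (by name: the statement is the Claim_ definition above) =====
theorem find_active_wallets_spec : Claim_equal_find_active_wallets := by
  intro rts m _ _
  unfold Spec_find_active_wallets
  rw [find_active_wallets, find_active_wallets_alt]
  have hn : ((PySem.Dict.ofList rts).items.map (·.1)).Nodup := PySem.Dict.nodup_keys_ofList rts
  set items := (PySem.Dict.ofList rts).items with hitems
  rw [pvA_wa, pvFold_step_items, pvB_wallets, ← PySem.Set.ofList_eq_foldl]
  rw [List.foldl_map]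
  refine congrArg PySem.Dict.items ?_
  apply PySem.List.foldl_congr_mem
  intro r w hw
  have hR := pvProj_eq_ranges items hn w
  have hRn : ((items.filter (fun p => p.2.any (fun tx => pvWallet tx == w))).map (·.1)).Nodup :=
    (List.Sublist.map (·.1) (List.filter_sublist (l := items))).nodup hn
  rw [hR]
  simp [PySem.Set.len, PySem.Set.ofList_eq_self_of_nodup _ hRn]
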